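-- pv_equiv track=rewrite | github.com/nhattruongpham/ALPR_SSD_CTPN_LPRNet | license_plate_recognize.py | get_low_box
-- ===== SOURCE A (Python) =====
-- def get_low_box(coods):
--     temp = []
--     for i in range(0, len(coods)):
--         box = coods[i]
--         y_max = max(int(box[1]), int(box[3]))
--         temp.append(y_max)
--     if temp:
--         return temp.index(max(temp))
--     return temp
-- ===== SOURCE B (Python) =====
-- def get_low_box(coods):
--     if not coods:
--         return None
--     best_i = 0
--     best_v = max(int(coods[0][1]), int(coods[0][3]))
--     i = 1
--     for box in coods[1:]:
--         v = max(int(box[1]), int(box[3]))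
--         if v > best_v:
--             best_i, best_v = i, v
--         i += 1
--     return best_i
-- ===== Notes on version B (the rewrite author's own statement) =====
-- stated objective: simpler
-- what changed: Replaces A's three phases (build the y_max list, take its max, re-scan with list.index) by a single-pass argmax that tracks the best index and value, updating only on a strict increase.
-- outside the precondition, e.g. on get_low_box([]): A returns [], B returns None
import Mathlib
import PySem

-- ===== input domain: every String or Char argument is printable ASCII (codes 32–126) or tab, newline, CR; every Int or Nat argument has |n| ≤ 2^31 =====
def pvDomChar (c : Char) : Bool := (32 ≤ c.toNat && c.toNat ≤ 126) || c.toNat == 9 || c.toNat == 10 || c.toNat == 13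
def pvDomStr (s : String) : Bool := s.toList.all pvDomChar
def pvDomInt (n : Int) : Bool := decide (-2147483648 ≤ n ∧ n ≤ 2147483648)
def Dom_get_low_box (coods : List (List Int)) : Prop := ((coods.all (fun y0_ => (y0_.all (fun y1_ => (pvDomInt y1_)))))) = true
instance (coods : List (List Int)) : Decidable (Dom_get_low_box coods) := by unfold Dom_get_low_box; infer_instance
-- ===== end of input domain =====

-- B replaces A's three phases (build y_max list, max, list.index) with a single-pass argmax; same O(n) cost, one pass.


-- ===== PORT A =====
-- temp = [max(box[1], box[3]) for box via the index loop]; then temp.index(max(temp)).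
def get_low_box (coods : List (List Int)) : Option Int :=
  let temp : List Int :=
    (PySem.List.pyRange 0 (coods.length : Int) 1).foldl (fun acc i =>
      let box := PySem.List.pyGetD coods i []
      let y_max := max (PySem.List.pyGetD box 1 0) (PySem.List.pyGetD box 3 0)
      acc ++ [y_max]) []
  match PySem.List.max? temp (fun x => x) with
  | some m => (PySem.List.index? temp m).map (fun k => (k : Int))
  | none => none

-- ===== PORT B =====
def altKey (box : List Int) : Int :=
  max (PySem.List.pyGetD box 1 0) (PySem.List.pyGetD box 3 0)

-- loop body: state (best_i, best_v, i); update on strict increase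
def altStep (s : Int × Int × Int) (box : List Int) : Int × Int × Int :=
  let v := altKey box
  if v > s.2.1 then (s.2.2, v, s.2.2 + 1) else (s.1, s.2.1, s.2.2 + 1)

def get_low_box_alt (coods : List (List Int)) : Option Int :=
  match coods with
  | [] => none
  | b0 :: rest => some (rest.foldl altStep (0, altKey b0, 1)).1

-- ===== PRECONDITION & SPEC =====
-- Pre_ excludes the inputs on which A does not return an int: empty coods (A returns the
-- empty list [], not an int) and any box shorter than 4 (A raises IndexError on box[3] or box[1]).
def Pre_get_low_box (coods : List (List Int)) : Prop :=
  coods ≠ [] ∧ ∀ box ∈ coods, 4 ≤ box.length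
instance (coods : List (List Int)) : Decidable (Pre_get_low_box coods) := by unfold Pre_get_low_box; infer_instance
def pvWitness_get_low_box : List (List Int) := [[0, 5, 0, 7]]
def Spec_get_low_box (coods : List (List Int)) (out : Option Int) : Prop := out = get_low_box_alt coods
instance (coods : List (List Int)) (out : Option Int) : Decidable (Spec_get_low_box coods out) := by unfold Spec_get_low_box; infer_instance

-- ===== CLAIM (what is proved, stated in full; the proofs are below) =====
def Claim_equal_get_low_box : Prop := ∀ (coods : List (List Int)), Dom_get_low_box coods → Pre_get_low_box coods → Spec_get_low_box coods (get_low_box coods)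

-- ===== LEMMAS AND PROOFS =====

-- loop invariant: pre is the processed prefix, m its running max, bi the index of m's
-- first occurrence; B's fold over the rest lands on the first index of the overall max.
lemma altLoopInv (ts : List Int) : ∀ (pre : List Int) (m : Int) (bi : Nat),
    (∀ x ∈ pre, x ≤ m) → PySem.List.index? pre m = some bi →
    ∃ k : Nat, PySem.List.index? (pre ++ ts) (ts.foldl max m) = some k ∧
      (ts.foldl (fun s v => if v > s.2.1 then (s.2.2, v, s.2.2 + 1) else (s.1, s.2.1, s.2.2 + 1))
        ((bi : Int), m, ((pre.length : Int)))).1 = (k : Int) := by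
  induction ts with
  | nil =>
    intro pre m bi hmax hidx
    exact ⟨bi, by simpa using hidx, rfl⟩
  | cons v ts ih =>
    intro pre m bi hmax hidx
    simp only [List.foldl_cons]
    by_cases hv : v > m
    · have hnotmem : v ∉ pre := fun hmem => absurd (hmax v hmem) (by omega)
      have hmax' : ∀ x ∈ pre ++ [v], x ≤ v := by
        intro x hx
        rcases List.mem_append.mp hx with h | h
        · exact le_of_lt (lt_of_le_of_lt (hmax x h) hv)
        · simp_all
      have hidx' := PySem.List.index?_append_singleton_self pre v hnotmem
      obtain ⟨k, hk, hfold⟩ := ih (pre ++ [v]) v pre.length hmax' hidx'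
      refine ⟨k, ?_, ?_⟩
      · rw [List.append_assoc] at hk
        simpa [max_eq_right (le_of_lt hv)] using hk
      · rw [if_pos hv] at *
        simpa [List.length_append] using hfold
    · have hle : v ≤ m := by omega
      have hmem : m ∈ pre := (PySem.List.index?_isSome_iff pre m).mp (by rw [hidx]; rfl)
      have hmax' : ∀ x ∈ pre ++ [v], x ≤ m := by
        intro x hx
        rcases List.mem_append.mp hx with h | h
        · exact hmax x h
        · simp_all
      have hidx' : PySem.List.index? (pre ++ [v]) m = some bi := by
        rw [PySem.List.index?_append_of_mem [v] hmem]; exact hidx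
      obtain ⟨k, hk, hfold⟩ := ih (pre ++ [v]) m bi hmax' hidx'
      refine ⟨k, ?_, ?_⟩
      · rw [List.append_assoc] at hk
        simpa [max_eq_left hle] using hk
      · rw [if_neg hv] at *
        simpa [List.length_append] using hfold

-- A's temp list is exactly the per-box keys, in order
lemma temp_eq_map (coods : List (List Int)) :
    (PySem.List.pyRange 0 (coods.length : Int) 1).foldl (fun acc i =>
      let box := PySem.List.pyGetD coods i []
      let y_max := max (PySem.List.pyGetD box 1 0) (PySem.List.pyGetD box 3 0)
      acc ++ [y_max]) [] = coods.map altKey := by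
  rw [PySem.List.foldl_append_singleton_eq_map]
  have h := PySem.List.map_pyGetD_pyRange_zero coods ([] : List Int)
  calc (PySem.List.pyRange 0 (coods.length : Int) 1).map
          (fun i => max (PySem.List.pyGetD (PySem.List.pyGetD coods i []) 1 0)
                        (PySem.List.pyGetD (PySem.List.pyGetD coods i []) 3 0))
      = ((PySem.List.pyRange 0 (PySem.List.len coods)).map
          (fun j => PySem.List.pyGetD coods j [])).map altKey := by
        rw [List.map_map]; rfl
    _ = coods.map altKey := by rw [h]

-- ===== VERDICT (by name: the statement is the Claim_ definition above) =====
theorem get_low_box_spec : Claim_equal_get_low_box := by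
  intro coods _ hpre
  obtain ⟨hne, -⟩ := hpre
  unfold Spec_get_low_box
  match coods, hne with
  | b0 :: rest, _ =>
    obtain ⟨k, hk, hfold⟩ := altLoopInv (rest.map altKey) [altKey b0] (altKey b0) 0
      (by intro x hx; simp_all) (PySem.List.index?_cons_self (altKey b0) [])
    simp only [List.singleton_append, List.length_singleton, Nat.cast_zero, Nat.cast_one]
      at hk hfold
    have hA : get_low_box (b0 :: rest) = some (k : Int) := by
      simp only [get_low_box, temp_eq_map (b0 :: rest), List.map_cons,
        PySem.List.max?_id_cons, hk]
      rfl
    have hB : get_low_box_alt (b0 :: rest) = some (k : Int) := by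
      unfold get_low_box_alt
      rw [List.foldl_map] at hfold
      exact congrArg some hfold
    rw [hA, hB]
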